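-- pv_equiv track=rewrite | github.com/Anirudh2465/OpenENV_Hackathon | env/physics.py | sat_positions_to_isl_graph
-- ===== SOURCE A (Python) =====
-- from typing import Dict, List, Optional, Tuple
--
-- ORBIT_DEGREES       = 360
--
-- ISL_RANGE_DEG       = 45     # Max inter-satellite link range
--
-- def angular_distance(a: int, b: int) -> int:
--     """Minimum angular separation on the ring."""
--     d = abs(a - b) % ORBIT_DEGREES
--     return min(d, ORBIT_DEGREES - d)
--
-- def sat_positions_to_isl_graph(sat_positions: Dict[str, int],
--                                 isl_range: int = ISL_RANGE_DEG) -> Dict[str, List[str]]: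
--     """Build adjacency map of ISL-reachable satellites."""
--     ids = list(sat_positions.keys())
--     graph: Dict[str, List[str]] = {sid: [] for sid in ids}
--     for i, a in enumerate(ids):
--         for b in ids[i + 1:]:
--             if angular_distance(sat_positions[a], sat_positions[b]) <= isl_range:
--                 graph[a].append(b)
--                 graph[b].append(a)
--     return graph
-- ===== SOURCE B (Python) =====
-- ORBIT_DEGREES = 360
-- ISL_RANGE_DEG = 45
--
-- def _ring_gap(a: int, b: int) -> int:
--     """Minimum angular separation on the ring (Python %% is already non-negative)."""
--     d = (a - b) % ORBIT_DEGREES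
--     return min(d, ORBIT_DEGREES - d)
--
-- def sat_positions_to_isl_graph(sat_positions, isl_range=ISL_RANGE_DEG):
--     """Per-node comprehension: for each satellite, filter all others in range.
--
--     Each adjacency list comes out in original insertion order, which is exactly
--     what the pairwise double-append of the original produces.
--     """
--     ids = list(sat_positions)
--     return {a: [b for b in ids
--                 if b != a and _ring_gap(sat_positions[a], sat_positions[b]) <= isl_range]
--             for a in ids}
-- ===== Notes on version B (the rewrite author's own statement) =====
-- stated objective: simpler
-- what changed: Replaced the mutating i<j double-append over a pre-initialised dict with a single dict comprehension that builds each adjacency list directly as a per-node in-order filter (relying on the fact that the pairwise symmetric appends produce each list in original index order).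
import Mathlib
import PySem

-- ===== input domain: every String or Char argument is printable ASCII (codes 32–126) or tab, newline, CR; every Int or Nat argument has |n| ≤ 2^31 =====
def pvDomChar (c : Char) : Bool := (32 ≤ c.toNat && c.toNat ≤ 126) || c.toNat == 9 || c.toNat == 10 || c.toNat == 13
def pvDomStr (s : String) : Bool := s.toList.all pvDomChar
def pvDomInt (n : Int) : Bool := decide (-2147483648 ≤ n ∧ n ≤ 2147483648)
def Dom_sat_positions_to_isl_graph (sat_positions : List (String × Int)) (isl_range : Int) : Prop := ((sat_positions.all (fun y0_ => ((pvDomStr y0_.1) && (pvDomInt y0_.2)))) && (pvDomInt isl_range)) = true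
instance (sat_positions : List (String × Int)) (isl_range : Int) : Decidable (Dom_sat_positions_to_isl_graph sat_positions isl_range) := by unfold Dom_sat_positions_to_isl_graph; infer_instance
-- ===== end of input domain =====

-- B replaces the mutating pairwise double-append with a per-node in-order filter (dict comprehension); equal output, same asymptotic cost.


-- ===== PORT A =====
def pvAngularDistance (a b : Int) : Int :=
  let d := PySem.Int.mod ((a - b).natAbs : Int) 360
  min d (360 - d)

def sat_positions_to_isl_graph (sat_positions : List (String × Int)) (isl_range : Int) : List (String × List String) :=
  let sp := PySem.Dict.ofList sat_positions
  let ids := sp.keys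
  ((PySem.List.enumerate ids 0).foldl
    (fun g p =>
      (PySem.List.slice ids (some (p.1 + 1)) none).foldl
        (fun g b =>
          if pvAngularDistance (sp.getD p.2 0) (sp.getD b 0) ≤ isl_range then
            (g.modify p.2 [] (fun l => l ++ [b])).modify b [] (fun l => l ++ [p.2])
          else g)
        g)
    (ids.foldl (fun g sid => g.insert sid ([] : List String)) PySem.Dict.empty)).items

-- ===== PORT B =====
def pvRingGap (a b : Int) : Int :=
  let d := PySem.Int.mod (a - b) 360
  min d (360 - d)

def sat_positions_to_isl_graph_alt (sat_positions : List (String × Int)) (isl_range : Int) : List (String × List String) :=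
  let sp := PySem.Dict.ofList sat_positions
  let ids := sp.keys
  (ids.foldl
    (fun d a =>
      d.insert a (ids.filter (fun b => (b != a) && decide (pvRingGap (sp.getD a 0) (sp.getD b 0) ≤ isl_range))))
    PySem.Dict.empty).items

-- ===== PRECONDITION & SPEC =====
def Spec_sat_positions_to_isl_graph (sat_positions : List (String × Int)) (isl_range : Int) (out : List (String × List String)) : Prop := out = sat_positions_to_isl_graph_alt sat_positions isl_range
instance (sat_positions : List (String × Int)) (isl_range : Int) (out : List (String × List String)) : Decidable (Spec_sat_positions_to_isl_graph sat_positions isl_range out) := by unfold Spec_sat_positions_to_isl_graph; infer_instance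

-- ===== CLAIM (what is proved, stated in full; the proofs are below) =====
def Claim_equal_sat_positions_to_isl_graph : Prop := ∀ (sat_positions : List (String × Int)) (isl_range : Int), Dom_sat_positions_to_isl_graph sat_positions isl_range → Spec_sat_positions_to_isl_graph sat_positions isl_range (sat_positions_to_isl_graph sat_positions isl_range)

-- ===== LEMMAS AND PROOFS =====

theorem pvDist_eq (a b : Int) : pvAngularDistance a b = pvRingGap a b := by
  simp only [pvAngularDistance, pvRingGap, PySem.Int.mod_eq_emod_of_pos (by norm_num : (0:Int) < 360)]
  rcases le_total (a - b) 0 with h | h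
  · rw [Int.ofNat_natAbs_of_nonpos h, min_def, min_def]; split_ifs <;> omega
  · rw [Int.natAbs_of_nonneg h]
theorem pvDist_comm (a b : Int) : pvAngularDistance a b = pvAngularDistance b a := by
  simp only [pvAngularDistance, PySem.Int.mod_eq_emod_of_pos (by norm_num : (0:Int) < 360)]
  have : (a - b).natAbs = (b - a).natAbs := by omega
  rw [this]

-- proof-side helpers: the body of A's inner loop, and A's i<j pair recursion
def pvStep (sp : PySem.Dict String Int) (r : Int) (g : PySem.Dict String (List String)) (a b : String) : PySem.Dict String (List String) :=
  if pvAngularDistance (sp.getD a 0) (sp.getD b 0) ≤ r then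
    (g.modify a [] (fun l => l ++ [b])).modify b [] (fun l => l ++ [a])
  else g
def pvPairFold (sp : PySem.Dict String Int) (r : Int) :
    List String → PySem.Dict String (List String) → PySem.Dict String (List String)
  | [], g => g
  | a :: rest, g => pvPairFold sp r rest (rest.foldl (fun g b => pvStep sp r g a b) g)
theorem pvOuter_eq (sp : PySem.Dict String Int) (r : Int) (full : List String) :
    ∀ (suf : List String) (n : Nat), full.drop n = suf → ∀ g,
    (PySem.List.enumerate suf (n : Int)).foldl
      (fun g p =>
        (PySem.List.slice full (some (p.1 + 1)) none).foldl
          (fun g b =>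
            if pvAngularDistance (sp.getD p.2 0) (sp.getD b 0) ≤ r then
              (g.modify p.2 [] (fun l => l ++ [b])).modify b [] (fun l => l ++ [p.2])
            else g)
          g)
      g = pvPairFold sp r suf g := by
  intro suf
  induction suf with
  | nil => intro n h g; simp [PySem.List.enumerate, pvPairFold]
  | cons a rest ih =>
    intro n h g
    have hdrop : full.drop (n + 1) = rest := by
      rw [← List.tail_drop, h, List.tail_cons]
    have hcast : (n : Int) + 1 = ((n + 1 : Nat) : Int) := by push_cast; ring
    rw [PySem.List.enumerate_cons, List.foldl_cons, hcast, PySem.List.slice_from_natCast, hdrop]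
    show _ = pvPairFold sp r (a :: rest) g
    rw [pvPairFold]
    exact ih (n + 1) hdrop _
theorem pvStep_keys (sp : PySem.Dict String Int) (r : Int) (g : PySem.Dict String (List String))
    (a b : String) (ha : g.contains a = true) (hb : g.contains b = true) :
    (pvStep sp r g a b).keys = g.keys := by
  unfold pvStep
  split
  · rw [PySem.Dict.keys_modify, PySem.Dict.keys_insert_of_contains]
    · rw [PySem.Dict.keys_modify, PySem.Dict.keys_insert_of_contains _ _ ha]
    · rw [PySem.Dict.contains_modify, hb, Bool.or_true]
  · rfl
theorem pvStep_contains (sp : PySem.Dict String Int) (r : Int) (g : PySem.Dict String (List String))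
    (a b : String) (ha : g.contains a = true) (hb : g.contains b = true) (x : String) :
    (pvStep sp r g a b).contains x = g.contains x := by
  rw [PySem.Dict.contains_eq_decide_mem_keys, PySem.Dict.contains_eq_decide_mem_keys,
    pvStep_keys sp r g a b ha hb]
theorem pvInner_keys (sp : PySem.Dict String Int) (r : Int) (a : String) :
    ∀ (rest : List String) (g : PySem.Dict String (List String)), g.contains a = true →
    (∀ b ∈ rest, g.contains b = true) →
    (rest.foldl (fun g b => pvStep sp r g a b) g).keys = g.keys := by
  intro rest
  induction rest with
  | nil => intro g _ _; rfl
  | cons b rest ih =>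
    intro g ha hb
    rw [List.foldl_cons]
    have hb' : g.contains b = true := hb b (by simp)
    rw [ih _ (by rw [pvStep_contains sp r g a b ha hb']; exact ha)
          (fun x hx => by rw [pvStep_contains sp r g a b ha hb']; exact hb x (by simp [hx])),
        pvStep_keys sp r g a b ha hb']
theorem pvPairFold_keys (sp : PySem.Dict String Int) (r : Int) :
    ∀ (xs : List String) (g : PySem.Dict String (List String)),
    (∀ x ∈ xs, g.contains x = true) →
    (pvPairFold sp r xs g).keys = g.keys := by
  intro xs
  induction xs with
  | nil => intro g _; rfl
  | cons a rest ih =>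
    intro g h
    have ha : g.contains a = true := h a (by simp)
    have hrest : ∀ x ∈ rest, g.contains x = true := fun x hx => h x (by simp [hx])
    rw [pvPairFold, ih _ (fun x hx => by
        rw [PySem.Dict.contains_eq_decide_mem_keys, pvInner_keys sp r a rest g ha hrest,
          ← PySem.Dict.contains_eq_decide_mem_keys]
        exact hrest x hx),
      pvInner_keys sp r a rest g ha hrest]
theorem pvInner_getD (sp : PySem.Dict String Int) (r : Int) (a k : String) :
    ∀ (rest : List String), a ∉ rest → rest.Nodup →
    ∀ g : PySem.Dict String (List String),
    (rest.foldl (fun g b => pvStep sp r g a b) g).getD k [] =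
      if k = a then
        g.getD a [] ++ rest.filter (fun b => decide (pvAngularDistance (sp.getD a 0) (sp.getD b 0) ≤ r))
      else
        g.getD k [] ++ (if k ∈ rest ∧ pvAngularDistance (sp.getD a 0) (sp.getD k 0) ≤ r then [a] else []) := by
  intro rest
  induction rest with
  | nil =>
    intro _ _ g
    simp only [List.foldl_nil, List.filter_nil, List.not_mem_nil, false_and, if_false,
      List.append_nil]
    split_ifs with h
    · subst h; rfl
    · rfl
  | cons b rest ih =>
    intro ha hnd g
    have hab : a ≠ b := fun h => ha (h ▸ List.mem_cons_self)
    have ha' : a ∉ rest := fun h => ha (List.mem_cons_of_mem b h)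
    have hbr : b ∉ rest := (List.nodup_cons.mp hnd).1
    rw [List.foldl_cons, ih ha' (List.nodup_cons.mp hnd).2]
    by_cases hka : k = a
    · subst hka
      rw [if_pos rfl, List.filter_cons]
      unfold pvStep
      by_cases hc : pvAngularDistance (sp.getD k 0) (sp.getD b 0) ≤ r
      · rw [if_pos hc, PySem.Dict.getD_modify, if_neg hab, PySem.Dict.getD_modify, if_pos rfl]
        simp [hc]
      · rw [if_neg hc]
        simp [hc]
    · simp only [if_neg hka]
      by_cases hkb : k = b
      · subst hkb
        rw [if_neg (fun h => hbr h.1)]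
        unfold pvStep
        by_cases hc : pvAngularDistance (sp.getD a 0) (sp.getD k 0) ≤ r
        · rw [if_pos hc, PySem.Dict.getD_modify, if_pos rfl, PySem.Dict.getD_modify,
            if_neg (Ne.symm hab), if_pos ⟨List.mem_cons_self, hc⟩]
          simp
        · rw [if_neg hc, if_neg (fun h => hc h.2)]
      · have hstep : (pvStep sp r g a b).getD k [] = g.getD k [] := by
          unfold pvStep
          split
          · rw [PySem.Dict.getD_modify, if_neg hkb, PySem.Dict.getD_modify, if_neg hka]
          · rfl
        rw [hstep]
        simp [List.mem_cons, hkb]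
theorem pvPairFold_getD (sp : PySem.Dict String Int) (r : Int) (k : String) :
    ∀ (xs : List String), xs.Nodup →
    ∀ g : PySem.Dict String (List String),
    (pvPairFold sp r xs g).getD k [] =
      g.getD k [] ++
        (if k ∈ xs then
          xs.filter (fun b => (b != k) && decide (pvAngularDistance (sp.getD k 0) (sp.getD b 0) ≤ r))
         else []) := by
  intro xs
  induction xs with
  | nil => intro _ g; simp [pvPairFold]
  | cons a rest ih =>
    intro hnd g
    have ha' : a ∉ rest := (List.nodup_cons.mp hnd).1
    have hnd' : rest.Nodup := (List.nodup_cons.mp hnd).2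
    rw [pvPairFold, ih hnd', pvInner_getD sp r a k rest ha' hnd' g]
    by_cases hka : k = a
    · subst hka
      rw [if_pos rfl, if_neg ha', if_pos List.mem_cons_self, List.filter_cons]
      simp only [bne_self_eq_false, Bool.false_and, Bool.false_eq_true, if_false, List.append_nil]
      have hfc : List.filter (fun b => decide (pvAngularDistance (sp.getD k 0) (sp.getD b 0) ≤ r)) rest
          = List.filter (fun b => b != k && decide (pvAngularDistance (sp.getD k 0) (sp.getD b 0) ≤ r)) rest :=
        List.filter_congr (fun b hb => by
          have hbk : b ≠ k := fun h => ha' (h ▸ hb)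
          simp [hbk])
      rw [hfc]
    · rw [if_neg hka, List.filter_cons]
      by_cases hkr : k ∈ rest
      · rw [if_pos hkr, if_pos (List.mem_cons_of_mem a hkr)]
        have hcomm : pvAngularDistance (sp.getD a 0) (sp.getD k 0)
            = pvAngularDistance (sp.getD k 0) (sp.getD a 0) := pvDist_comm _ _
        have hbne : (a != k) = true := by simp [Ne.symm hka]
        rw [hbne]
        by_cases hc : pvAngularDistance (sp.getD a 0) (sp.getD k 0) ≤ r
        · rw [if_pos ⟨hkr, hc⟩]
          simp [← hcomm, hc]
        · rw [if_neg (fun h => hc h.2)]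
          simp [← hcomm, hc]
      · rw [if_neg (fun h => hkr h.1), if_neg hkr,
          if_neg (by simp [List.mem_cons, hka, hkr])]
        simp

-- ===== VERDICT (by name: the statement is the Claim_ definition above) =====
theorem sat_positions_to_isl_graph_spec : Claim_equal_sat_positions_to_isl_graph := by
  intro sps r _
  unfold Spec_sat_positions_to_isl_graph
  simp only [sat_positions_to_isl_graph, sat_positions_to_isl_graph_alt]
  have hnd : (PySem.Dict.ofList sps).keys.Nodup := PySem.Dict.nodup_keys_ofList sps
  set sp := PySem.Dict.ofList sps with hsp
  set ids := sp.keys with hids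
  -- the initial graph {sid: [] for sid in ids}
  have h0items : (ids.foldl (fun g sid => g.insert sid ([] : List String)) PySem.Dict.empty).items
      = ids.map (fun a => (a, ([] : List String))) := by
    have h := PySem.Dict.items_foldl_insert_fresh ids (fun a => a) (fun _ => ([] : List String))
      PySem.Dict.empty (fun a _ => PySem.Dict.contains_empty a) (by simpa using hnd)
    simpa using h
  have h0keys : (ids.foldl (fun g sid => g.insert sid ([] : List String)) PySem.Dict.empty).keys = ids := by
    simp [PySem.Dict.keys, h0items, List.map_map, Function.comp_def]
  have h0contains : ∀ x ∈ ids, (ids.foldl (fun g sid => g.insert sid ([] : List String)) PySem.Dict.empty).contains x = true := by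
    intro x hx
    rw [PySem.Dict.contains_iff_mem_keys, h0keys]
    exact hx
  have h0getD : ∀ k, (ids.foldl (fun g sid => g.insert sid ([] : List String)) PySem.Dict.empty).getD k [] = ([] : List String) := by
    intro k
    by_cases h : (ids.foldl (fun g sid => g.insert sid ([] : List String)) PySem.Dict.empty).contains k = true
    · rw [PySem.Dict.contains_iff_mem_keys, h0keys] at h
      refine PySem.Dict.getD_of_mem_items (d := ids.foldl (fun g sid => g.insert sid ([] : List String)) PySem.Dict.empty) ?_ (by rw [h0keys]; exact hnd) []
      rw [h0items]
      exact List.mem_map_of_mem h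
    · exact PySem.Dict.getD_of_not_contains _ _ (by simpa using h)
  -- rewrite A's nested loop into the pair recursion
  have hA := pvOuter_eq sp r ids ids 0 rfl
    (ids.foldl (fun g sid => g.insert sid ([] : List String)) PySem.Dict.empty)
  simp only [Nat.cast_zero] at hA
  rw [hA]
  -- A's items via its keys
  have hkeys : (pvPairFold sp r ids (ids.foldl (fun g sid => g.insert sid ([] : List String)) PySem.Dict.empty)).keys = ids := by
    rw [pvPairFold_keys sp r ids _ h0contains, h0keys]
  rw [PySem.Dict.items_eq_map_keys _ (by rw [hkeys]; exact hnd) ([] : List String), hkeys]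
  -- B's items
  have hB := PySem.Dict.items_foldl_insert_fresh ids (fun a => a)
    (fun a => ids.filter (fun b => (b != a) && decide (pvRingGap (sp.getD a 0) (sp.getD b 0) ≤ r)))
    PySem.Dict.empty (fun a _ => PySem.Dict.contains_empty a) (by simpa using hnd)
  simp only [show (PySem.Dict.empty : PySem.Dict String (List String)).items = [] from rfl, List.nil_append] at hB
  rw [hB]
  refine List.map_congr_left ?_
  intro k hk
  rw [pvPairFold_getD sp r k ids hnd _, h0getD k, if_pos hk, List.nil_append]
  simp [pvDist_eq]
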